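-- pv_equiv track=rewrite | github.com/kmanu225/cryptoword | algorithms/classical/vigenere/utils.py | vigenere_to_cesars
-- ===== SOURCE A (Python) =====
-- def vigenere_to_cesars(text, l):
--     """
--     Converts a Vigenère cipher text to multiple Caesar cipher texts based on the key length.
--
--     Args:
--         text (str): The Vigenère ciphertext.
--         l (int): The key length for the Vigenère cipher.
--
--     Returns:
--         list: A list of `l` Caesar cipher texts corresponding to the Vigenère cipher's split.
--     """
--     cesar_texts = []
--     for i in range(l):
--         cesar_text = ""
--         for j in range(i, len(text), l):
--             cesar_text += text[j]
--         cesar_texts.append(cesar_text)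
--     return cesar_texts
-- ===== SOURCE B (Python) =====
-- def vigenere_to_cesars(text, l):
--     """
--     Converts a Vigenère cipher text to multiple Caesar cipher texts based on the key length.
--
--     Single scatter pass: each character at position j goes into bucket j % l,
--     instead of l strided gather passes over the text.
--     """
--     if l <= 0:
--         return []
--     buckets = [[] for _ in range(l)]
--     for j, ch in enumerate(text):
--         buckets[j % l].append(ch)
--     return ["".join(b) for b in buckets]
-- ===== Notes on version B (the rewrite author's own statement) =====
-- stated objective: alternative
-- what changed: B replaces A's l strided gather passes (one per residue, with string concatenation) by a single scatter pass over the text that appends each character into bucket j % l and joins the buckets at the end.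
import Mathlib
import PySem

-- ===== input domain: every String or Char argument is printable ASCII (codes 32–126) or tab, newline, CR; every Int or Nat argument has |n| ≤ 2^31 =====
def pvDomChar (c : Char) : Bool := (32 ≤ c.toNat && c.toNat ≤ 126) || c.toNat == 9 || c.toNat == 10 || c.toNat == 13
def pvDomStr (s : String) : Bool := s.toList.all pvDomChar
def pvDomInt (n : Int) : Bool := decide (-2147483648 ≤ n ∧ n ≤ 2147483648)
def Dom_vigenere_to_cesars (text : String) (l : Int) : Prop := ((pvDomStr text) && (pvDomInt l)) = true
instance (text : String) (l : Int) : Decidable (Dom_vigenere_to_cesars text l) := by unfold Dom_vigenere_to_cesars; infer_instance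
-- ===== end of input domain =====

-- B replaces A's l strided gather passes by one scatter pass putting character j into bucket j % l; same return value, no speed claim proved here.

-- ===== PORT A =====
-- A's growing string `cesar_text` is modelled as a List Char joined by String.mk at the end
-- (PySem strings are proved on the List Char side).  text[j] is always in range in A
-- (j < len(text) by the range bound), so the `.getD []` default is never taken.
def vigenere_to_cesars (text : String) (l : Int) : List String :=
  (PySem.List.pyRange 0 l 1).foldl
    (fun cesar_texts i =>
      cesar_texts ++
        [String.mk ((PySem.List.pyRange i (PySem.Str.len text) l).foldl
          (fun cesar_text j =>
            cesar_text ++ ((PySem.Str.pyGet? text j).map (fun c => [c])).getD [])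
          [])])
    []

-- ===== PORT B =====
-- B: guard l <= 0, then one pass over enumerate(text) appending each char into bucket j % l,
-- finally ''.join each bucket (String.mk).
def vigenere_to_cesars_alt (text : String) (l : Int) : List String :=
  if l ≤ 0 then []
  else
    ((PySem.List.enumerate text.toList 0).foldl
      (fun buckets p =>
        buckets.modify (PySem.Int.mod p.1 l).toNat (fun b => b ++ [p.2]))
      (List.replicate l.toNat [])).map String.mk

-- ===== PRECONDITION & SPEC =====
def Spec_vigenere_to_cesars (text : String) (l : Int) (out : List String) : Prop := out = vigenere_to_cesars_alt text l
instance (text : String) (l : Int) (out : List String) : Decidable (Spec_vigenere_to_cesars text l out) := by unfold Spec_vigenere_to_cesars; infer_instance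

-- ===== CLAIM (what is proved, stated in full; the proofs are below) =====
def Claim_equal_vigenere_to_cesars : Prop := ∀ (text : String) (l : Int), Dom_vigenere_to_cesars text l → Spec_vigenere_to_cesars text l (vigenere_to_cesars text l)

-- ===== LEMMAS AND PROOFS =====

-- A's inner loop (gather pass for residue i), on the List Char side.
def pvGather (cs : List Char) (l i : Int) : List Char :=
  (PySem.List.pyRange i (cs.length : Int) l).foldl
    (fun cesar_text j =>
      cesar_text ++ ((PySem.List.pyGet? cs j).map (fun c => [c])).getD [])
    []

lemma pvPairwise_pyRange (a b s : Int) (hs : 0 < s) :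
    (PySem.List.pyRange a b s).Pairwise (· < ·) := by
  rw [PySem.List.pyRange_of_pos a b hs]
  refine List.Pairwise.map _ (fun k k' h => ?_) List.pairwise_lt_range
  have : (k : Int) < (k' : Int) := by exact_mod_cast h
  nlinarith

-- splitting a strided range at its right end
lemma pvRange_split (L n i : Nat) (hL : 0 < L) (hi : i < L) :
    PySem.List.pyRange (i : Int) ((n : Int) + 1) (L : Int)
      = PySem.List.pyRange (i : Int) (n : Int) (L : Int)
        ++ (if (n : Int) % (L : Int) = (i : Int) then [(n : Int)] else []) := by
  have hLpos : (0 : Int) < (L : Int) := by exact_mod_cast hL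
  have hmodiff : ((n : Int) % (L : Int) = (i : Int)) ↔ ((i : Int) ≤ (n : Int) ∧ (L : Int) ∣ (n : Int) - (i : Int)) := by
    constructor
    · intro h
      constructor
      · by_contra hlt
        push_neg at hlt
        have : (n : Int) % (L : Int) = (n : Int) :=
          Int.emod_eq_of_lt (by positivity) (by exact_mod_cast lt_trans (by exact_mod_cast hlt) (by exact_mod_cast hi))
        omega
      · refine ⟨(n : Int) / (L : Int), ?_⟩
        have := Int.ediv_add_emod (n : Int) (L : Int)
        omega
    · rintro ⟨hle, ⟨k, hk⟩⟩
      have : (n : Int) = (i : Int) + (L : Int) * k := by omega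
      rw [this, Int.add_mul_emod_self_left]
      exact Int.emod_eq_of_lt (by positivity) (by exact_mod_cast hi)
  -- both sides are strictly increasing with equal membership
  have p1 : (PySem.List.pyRange (i : Int) ((n : Int) + 1) (L : Int)).Pairwise (· < ·) :=
    pvPairwise_pyRange _ _ _ hLpos
  have p2 : (PySem.List.pyRange (i : Int) (n : Int) (L : Int)
        ++ (if (n : Int) % (L : Int) = (i : Int) then [(n : Int)] else [])).Pairwise (· < ·) := by
    refine List.pairwise_append.mpr ⟨pvPairwise_pyRange _ _ _ hLpos, ?_, ?_⟩
    · split_ifs <;> simp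
    · intro x hx y hy
      have hx' := (PySem.List.mem_pyRange_iff_of_pos hLpos x).mp hx
      split_ifs at hy with hc
      · simp at hy; omega
      · simp at hy
  have hmem : ∀ x, x ∈ PySem.List.pyRange (i : Int) ((n : Int) + 1) (L : Int) ↔
      x ∈ PySem.List.pyRange (i : Int) (n : Int) (L : Int)
        ++ (if (n : Int) % (L : Int) = (i : Int) then [(n : Int)] else []) := by
    intro x
    rw [List.mem_append, PySem.List.mem_pyRange_iff_of_pos hLpos, PySem.List.mem_pyRange_iff_of_pos hLpos]
    constructor
    · rintro ⟨h1, h2, h3⟩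
      by_cases hx : x = (n : Int)
      · right
        subst hx
        rw [if_pos (hmodiff.mpr ⟨h1, h3⟩)]
        simp
      · exact Or.inl ⟨h1, by omega, h3⟩
    · rintro (⟨h1, h2, h3⟩ | hx)
      · exact ⟨h1, by omega, h3⟩
      · split_ifs at hx with hc
        · simp at hx
          subst hx
          obtain ⟨hle, hdvd⟩ := hmodiff.mp hc
          exact ⟨hle, by omega, hdvd⟩
        · simp at hx
  have nd1 : (PySem.List.pyRange (i : Int) ((n : Int) + 1) (L : Int)).Nodup :=
    p1.imp (fun h => ne_of_lt h)
  have nd2 : (PySem.List.pyRange (i : Int) (n : Int) (L : Int)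
        ++ (if (n : Int) % (L : Int) = (i : Int) then [(n : Int)] else [])).Nodup :=
    p2.imp (fun h => ne_of_lt h)
  exact PySem.List.eq_of_perm_of_pairwise_le_of_injective (fun x => x) (fun _ _ h => h)
    ((List.perm_ext_iff_of_nodup nd1 nd2).mpr hmem)
    (p1.imp le_of_lt) (p2.imp le_of_lt)

-- extending the text by one character appends to exactly one gather pass
lemma pvGather_append (cs : List Char) (c : Char) (L i : Nat) (hL : 0 < L) (hi : i < L) :
    pvGather (cs ++ [c]) (L : Int) (i : Int)
      = pvGather cs (L : Int) (i : Int)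
        ++ (if ((cs.length : Int) % (L : Int) = (i : Int)) then [c] else []) := by
  have hLpos : (0 : Int) < (L : Int) := by exact_mod_cast hL
  unfold pvGather
  have hlen : (((cs ++ [c]).length : Nat) : Int) = (cs.length : Int) + 1 := by
    simp
  rw [hlen, pvRange_split L cs.length i hL hi, List.foldl_append]
  have hcongr :
      (PySem.List.pyRange (i : Int) (cs.length : Int) (L : Int)).foldl
        (fun cesar_text j => cesar_text ++ ((PySem.List.pyGet? (cs ++ [c]) j).map (fun c => [c])).getD []) []
      = (PySem.List.pyRange (i : Int) (cs.length : Int) (L : Int)).foldl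
        (fun cesar_text j => cesar_text ++ ((PySem.List.pyGet? cs j).map (fun c => [c])).getD []) [] := by
    refine PySem.List.foldl_congr_mem _ _ _ _ (fun acc j hj => ?_)
    have hj' := (PySem.List.mem_pyRange_iff_of_pos hLpos j).mp hj
    have h0 : (0 : Int) ≤ j := le_trans (by positivity) hj'.1
    have hjlt : j.toNat < cs.length := by omega
    rw [PySem.List.pyGet?_of_nonneg _ h0, PySem.List.pyGet?_of_nonneg _ h0,
      List.getElem?_append_left hjlt]
  rw [hcongr]
  split_ifs with hc
  · simp only [List.foldl_cons, List.foldl_nil]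
    have hget : PySem.List.pyGet? (cs ++ [c]) (cs.length : Int) = some c :=
      PySem.List.pyGet?_append_length cs [] c
    rw [hget]
    rfl
  · simp

-- one scatter pass produces exactly the list of gather passes
lemma pvMain (L : Nat) (hL : 0 < L) (cs : List Char) :
    (PySem.List.enumerate cs 0).foldl
        (fun buckets p => buckets.modify (PySem.Int.mod p.1 (L : Int)).toNat (fun b => b ++ [p.2]))
        (List.replicate L [])
      = (List.range L).map (fun i : Nat => pvGather cs (L : Int) (i : Int)) := by
  induction cs using List.reverseRecOn with
  | nil =>
      have hg : ∀ i : Nat, pvGather [] (L : Int) (i : Int) = [] := by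
        intro i
        unfold pvGather
        have hr : PySem.List.pyRange (i : Int) ((([] : List Char).length : Nat) : Int) (L : Int) = [] := by
          rw [PySem.List.pyRange_of_pos _ _ (by exact_mod_cast hL)]
          rw [if_neg (by simp)]
          simp
        rw [hr]
        rfl
      rw [show PySem.List.enumerate ([] : List Char) 0 = [] from rfl, List.foldl_nil]
      apply List.ext_getElem
      · simp
      · intro j h1 h2
        simp only [List.getElem_map, List.getElem_range, List.getElem_replicate]
        exact (hg _).symm
  | append_singleton cs c ih =>
      rw [PySem.List.enumerate_append, List.foldl_append, ih]
      have henum1 : PySem.List.enumerate [c] (0 + (cs.length : Int)) = [((cs.length : Int), c)] := by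
        simp [PySem.List.enumerate]
      rw [henum1]
      simp only [List.foldl_cons, List.foldl_nil]
      have hmod : (PySem.Int.mod (cs.length : Int) (L : Int)) = ((cs.length % L : Nat) : Int) := by
        rw [PySem.Int.mod_eq_emod_of_pos (by exact_mod_cast hL)]
        exact (Int.natCast_mod cs.length L).symm
      rw [hmod]
      apply List.ext_getElem
      · simp
      · intro j h1 h2
        simp only [List.length_map, List.length_range] at h2
        have hjL : j < L := h2
        rw [List.getElem_map, List.getElem_range]
        have htoNat : (((cs.length % L : Nat) : Int)).toNat = cs.length % L := Int.toNat_natCast _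
        simp only [htoNat] at h1 ⊢
        have hstep := List.getElem?_modify (fun b => b ++ [c]) (cs.length % L)
          ((List.range L).map (fun i : Nat => pvGather cs (L : Int) (i : Int))) j
        have hjget : ((List.range L).map (fun i : Nat => pvGather cs (L : Int) (i : Int)))[j]? =
            some (pvGather cs (L : Int) (j : Int)) := by
          rw [List.getElem?_map, List.getElem?_range hjL]
          rfl
        rw [hjget] at hstep
        have hsome : (((List.range L).map (fun i : Nat => pvGather cs (L : Int) (i : Int))).modify
              (cs.length % L) (fun b => b ++ [c]))[j]?
            = some (if cs.length % L = j then pvGather cs (L : Int) (j : Int) ++ [c]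
                    else pvGather cs (L : Int) (j : Int)) := by
          rw [hstep]
          by_cases hj : cs.length % L = j <;> simp [hj]
        have hval : (((List.range L).map (fun i : Nat => pvGather cs (L : Int) (i : Int))).modify
              (cs.length % L) (fun b => b ++ [c]))[j]
            = (if cs.length % L = j then pvGather cs (L : Int) (j : Int) ++ [c]
               else pvGather cs (L : Int) (j : Int)) := by
          have hg := List.getElem?_eq_getElem h1
          rw [hg] at hsome
          exact Option.some.inj hsome
        rw [hval, pvGather_append cs c L j hL hjL]
        have hcond : ((cs.length : Int) % (L : Int) = (j : Int)) ↔ (cs.length % L = j) := by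
          rw [← Int.natCast_mod]
          exact Int.natCast_inj
        by_cases hj : cs.length % L = j
        · rw [if_pos hj, if_pos (hcond.mpr hj)]
        · rw [if_neg hj, if_neg (fun hcc => hj (hcond.mp hcc)), List.append_nil]

-- ===== VERDICT (by name: the statement is the Claim_ definition above) =====
theorem vigenere_to_cesars_spec : Claim_equal_vigenere_to_cesars := by
  intro text l _
  unfold Spec_vigenere_to_cesars vigenere_to_cesars vigenere_to_cesars_alt
  by_cases hl : l ≤ 0
  · rw [if_pos hl, PySem.List.pyRange_one_eq_nil hl, List.foldl_nil]
  · rw [if_neg hl]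
    have hl' : 0 < l := by omega
    have hL : l = ((l.toNat : Nat) : Int) := (Int.toNat_of_nonneg (le_of_lt hl')).symm
    have hLpos : 0 < l.toNat := by omega
    rw [PySem.List.foldl_append_singleton_eq_map, List.nil_append]
    rw [hL, PySem.List.pyRange_zero_natCast, List.map_map]
    simp only [Int.toNat_natCast]
    rw [pvMain l.toNat hLpos text.toList, List.map_map]
    refine List.map_congr_left (fun i _ => ?_)
    simp [pvGather, PySem.Str.pyGet?, PySem.Chars.pyGet?, PySem.Str.len_eq]
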